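-- pv_equiv track=rewrite | github.com/ChinYoung/leetcode-solution | 1003.检查替换后的词是否有效.py | removeAbc
-- ===== SOURCE A (Python) =====
-- def removeAbc(string):
--     temp = ''
--     expect = 'a'
--     res = ''
--     for i in string:
--         if i == expect:
--             # there is a 'abc', discard and restart
--             if expect == 'c':
--                 temp = ''
--             else:
--                 temp += i
--             # set new expectation char
--             if i == 'a':
--                 expect = 'b'
--             elif i == 'b':
--                 expect = 'c'
--             elif i == 'c':
--                 expect = 'a'
--         else:
--             # not a valid 'abc', save latest char to the return value
--             res += temp
--             # a fresh new start with char 'a'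
--             if i == 'a':
--                 expect = 'b'
--                 temp = i
--             else:
--                 # not a fresh start, save the current char to the return value
--                 res += i
--                 temp = ''
--                 expect = 'a'
--     res += temp
--     return res
-- ===== SOURCE B (Python) =====
-- def removeAbc(string):
--     # Single left-to-right non-overlapping removal of 'abc' is exactly str.replace.
--     return string.replace('abc', '')
-- ===== Notes on version B (the rewrite author's own statement) =====
-- stated objective: simpler
-- what changed: The hand-rolled three-state machine with temp/expect/res buffers is replaced by a single str.replace('abc','') call, whose left-to-right non-overlapping substring removal is exactly what the state machine computes.
import Mathlib
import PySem

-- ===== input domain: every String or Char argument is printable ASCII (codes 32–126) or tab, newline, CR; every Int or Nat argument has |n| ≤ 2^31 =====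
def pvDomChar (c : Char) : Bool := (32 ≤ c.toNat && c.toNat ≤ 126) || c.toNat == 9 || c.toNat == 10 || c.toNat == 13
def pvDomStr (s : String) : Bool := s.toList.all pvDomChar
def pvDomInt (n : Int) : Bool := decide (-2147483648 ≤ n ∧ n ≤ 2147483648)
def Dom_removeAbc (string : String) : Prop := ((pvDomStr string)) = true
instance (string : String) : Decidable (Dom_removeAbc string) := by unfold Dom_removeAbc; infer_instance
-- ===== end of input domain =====

-- B replaces A's hand-rolled three-state 'abc'-scanner by a single str.replace('abc','') call (simpler).


-- ===== PORT A =====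
-- one loop iteration of A: state = ((temp, expect), res)
def removeAbcStep (st : (List Char × Char) × List Char) (i : Char) : (List Char × Char) × List Char :=
  let temp := st.1.1
  let expect := st.1.2
  let res := st.2
  if i = expect then
    let temp := if expect = 'c' then ([] : List Char) else temp ++ [i]
    let expect := if i = 'a' then 'b' else if i = 'b' then 'c' else if i = 'c' then 'a' else expect
    ((temp, expect), res)
  else
    let res := res ++ temp
    if i = 'a' then (([i], 'b'), res)
    else (([], 'a'), res ++ [i])

def removeAbc (string : String) : String :=
  let st := string.toList.foldl removeAbcStep (([], 'a'), [])
  String.ofList (st.2 ++ st.1.1)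

-- ===== PORT B =====
def removeAbc_alt (string : String) : String := PySem.Str.replace string "abc" ""

-- ===== PRECONDITION & SPEC =====
def Spec_removeAbc (string : String) (out : String) : Prop := out = removeAbc_alt string
instance (string : String) (out : String) : Decidable (Spec_removeAbc string out) := by unfold Spec_removeAbc; infer_instance

-- ===== CLAIM (what is proved, stated in full; the proofs are below) =====
def Claim_equal_removeAbc : Prop := ∀ (string : String), Dom_removeAbc string → Spec_removeAbc string (removeAbc string)

-- ===== LEMMAS AND PROOFS =====

-- reference function: remove 'abc' left to right, non-overlapping
def rep : List Char → List Char
  | [] => []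
  | c :: t => if ['a','b','c'].isPrefixOf (c :: t) then rep (t.drop 2) else c :: rep t
termination_by l => l.length
decreasing_by
  · simp [List.length_drop]
  · simp

lemma repGo : ∀ (n : Nat) (l acc : List Char), l.length ≤ n →
    PySem.Chars.replace.go ['a','b','c'] [] n l acc = acc.reverse ++ rep l := by
  intro n
  induction n with
  | zero =>
    intro l acc h
    have : l = [] := List.eq_nil_of_length_eq_zero (Nat.le_zero.mp h)
    subst this
    simp [PySem.Chars.replace.go, rep]
  | succ n ih =>
    intro l acc h
    cases l with
    | nil => simp [PySem.Chars.replace.go, rep]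
    | cons c t =>
      by_cases hp : ['a','b','c'].isPrefixOf (c :: t) = true
      · have hlen : (t.drop 2).length ≤ n := by
          simp only [List.length_cons] at h
          simp [List.length_drop]; omega
        rw [PySem.Chars.replace.go, if_pos hp]
        rw [show (c :: t).drop ['a','b','c'].length = t.drop 2 by simp]
        rw [ih _ _ hlen]
        rw [rep, if_pos hp]
        simp
      · have hlen : t.length ≤ n := by simp only [List.length_cons] at h; omega
        rw [PySem.Chars.replace.go, if_neg hp]
        rw [ih _ _ hlen]
        rw [rep, if_neg hp]
        simp

lemma foldA : ∀ (n : Nat) (l : List Char), l.length ≤ n → ∀ res : List Char,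
    ((l.foldl removeAbcStep (([], 'a'), res)).2 ++ (l.foldl removeAbcStep (([], 'a'), res)).1.1)
      = res ++ rep l := by
  intro n
  induction n with
  | zero =>
    intro l h res
    have : l = [] := List.eq_nil_of_length_eq_zero (Nat.le_zero.mp h)
    subst this
    simp [rep]
  | succ n ih =>
    intro l h res
    cases l with
    | nil => simp [rep]
    | cons c t =>
      simp only [List.length_cons] at h
      by_cases hc : c = 'a'
      · subst hc
        cases t with
        | nil => simp [List.foldl, removeAbcStep, rep, List.isPrefixOf]
        | cons d t' =>
          simp only [List.length_cons] at h
          by_cases hd : d = 'b'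
          · subst hd
            cases t' with
            | nil => simp [List.foldl, removeAbcStep, rep, List.isPrefixOf]
            | cons e t'' =>
              simp only [List.length_cons] at h
              by_cases he : e = 'c'
              · subst he
                have hrec := ih t'' (by omega) res
                simp only [List.foldl, removeAbcStep] at hrec ⊢
                simp only [rep, List.isPrefixOf]
                simpa using hrec
              · by_cases hea : e = 'a'
                · subst hea
                  have hrec := ih ('a' :: t'') (by simp only [List.length_cons]; omega) (res ++ ['a','b'])
                  simp only [List.foldl, removeAbcStep] at hrec ⊢
                  simp [he] at hrec ⊢
                  rw [rep, if_neg (by intro hk; simp at hk; all_goals (first | exact he hk.symm | exact he hk.1.symm | exact he hk.2.symm | exact he hk.2.1.symm | exact he hk.2.2.symm | exact he hk.2.2.1.symm))]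
                  rw [show rep ('b' :: 'a' :: t'') = 'b' :: rep ('a' :: t'') by
                    rw [rep, if_neg (by simp)]]
                  simpa using hrec
                · have hrec := ih t'' (by omega) (res ++ ['a','b',e])
                  simp only [List.foldl, removeAbcStep] at hrec ⊢
                  simp [he, hea] at hrec ⊢
                  rw [rep, if_neg (by intro hk; simp at hk; all_goals (first | exact he hk.symm | exact he hk.1.symm | exact he hk.2.symm | exact he hk.2.1.symm | exact he hk.2.2.symm | exact he hk.2.2.1.symm))]
                  rw [show rep ('b' :: e :: t'') = 'b' :: rep (e :: t'') by
                    rw [rep, if_neg (by intro hk; simp at hk; all_goals (first | exact hea hk.symm | exact hea hk.1.symm | exact hea hk.2.symm | exact hea hk.2.1.symm | exact hea hk.2.2.symm | exact hea hk.2.2.1.symm))]]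
                  rw [show rep (e :: t'') = e :: rep t'' by
                    rw [rep, if_neg (by intro hk; simp at hk; all_goals (first | exact hea hk.symm | exact hea hk.1.symm | exact hea hk.2.symm | exact hea hk.2.1.symm | exact hea hk.2.2.symm | exact hea hk.2.2.1.symm))]]
                  simpa using hrec
          · by_cases hda : d = 'a'
            · subst hda
              have hrec := ih ('a' :: t') (by simp only [List.length_cons]; omega) (res ++ ['a'])
              simp only [List.foldl, removeAbcStep] at hrec ⊢
              simp at hrec ⊢
              rw [rep, if_neg (by intro hk; simp at hk; all_goals (first | exact hd hk.symm | exact hd hk.1.symm | exact hd hk.2.symm | exact hd hk.2.1.symm | exact hd hk.2.2.symm | exact hd hk.2.2.1.symm))]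
              simpa using hrec
            · have hrec := ih t' (by omega) (res ++ ['a', d])
              simp only [List.foldl, removeAbcStep] at hrec ⊢
              simp [hd, hda] at hrec ⊢
              rw [rep, if_neg (by intro hk; simp at hk; all_goals (first | exact hd hk.symm | exact hd hk.1.symm | exact hd hk.2.symm | exact hd hk.2.1.symm | exact hd hk.2.2.symm | exact hd hk.2.2.1.symm))]
              rw [show rep (d :: t') = d :: rep t' by
                rw [rep, if_neg (by intro hk; simp at hk; all_goals (first | exact hda hk.symm | exact hda hk.1.symm | exact hda hk.2.symm | exact hda hk.2.1.symm | exact hda hk.2.2.symm | exact hda hk.2.2.1.symm))]]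
              simpa using hrec
      · have hrec := ih t (by omega) (res ++ [c])
        simp only [List.foldl, removeAbcStep] at hrec ⊢
        simp [hc] at hrec ⊢
        rw [rep, if_neg (by intro hk; simp at hk; all_goals (first | exact hc hk.symm | exact hc hk.1.symm | exact hc hk.2.symm | exact hc hk.2.1.symm | exact hc hk.2.2.symm | exact hc hk.2.2.1.symm))]
        simpa using hrec

-- ===== VERDICT (by name: the statement is the Claim_ definition above) =====
theorem removeAbc_spec : Claim_equal_removeAbc := by
  intro s _
  unfold Spec_removeAbc removeAbc removeAbc_alt PySem.Str.replace
  rw [show PySem.Chars.replace s.toList "abc".toList "".toList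
        = PySem.Chars.replace.go ['a','b','c'] [] s.toList.length s.toList [] by
    simp [PySem.Chars.replace]]
  rw [repGo s.toList.length s.toList [] le_rfl]
  show String.ofList
      ((List.foldl removeAbcStep (([], 'a'), []) s.toList).2
        ++ (List.foldl removeAbcStep (([], 'a'), []) s.toList).1.1) = _
  rw [foldA s.toList.length s.toList le_rfl []]
  simp
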